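-- pv_equiv track=rewrite | github.com/vina123baov/Combinatorics-and-Graph-Theory-Final | Project_Integer_Partition/Bài_toán_3.py | generate_self_conjugate_partitions
-- ===== SOURCE A (Python) =====
-- def generate_self_conjugate_partitions(n):
--     def is_self_conjugate(partition):
--         width = partition[0]
--         height = len(partition)
--         grid = [[0] * width for _ in range(height)]
--         for i in range(height):
--             for j in range(partition[i]):
--                 grid[i][j] = 1
--         for i in range(height):
--             for j in range(partition[i]):
--                 if j >= len(grid): return False
--                 if i >= len(grid[j]): return False
--                 if grid[i][j] != grid[j][i]: return False
--         return True
--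
--     def helper(n, max_val, path, result):
--         if n == 0:
--             if is_self_conjugate(path):
--                 result.append(list(path))
--             return
--         for i in range(min(n, max_val), 0, -1):
--             if not path or i <= path[-1]:
--                 path.append(i)
--                 helper(n - i, i, path, result)
--                 path.pop()
--
--     result = []
--     helper(n, n, [], result)
--     return result
-- ===== SOURCE B (Python) =====
-- def generate_self_conjugate_partitions(n):
--     def parts(n, mx):
--         # all partitions of n into parts <= mx, largest part first, descending DFS order
--         if n == 0:
--             return [[]]
--         out = []
--         for i in range(min(n, mx), 0, -1):
--             for rest in parts(n - i, i):
--                 out.append([i] + rest)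
--         return out
--
--     def self_conjugate(p):
--         # compare p with its conjugate, computed as a count vector in one pass
--         c = [0] * p[0]
--         for part in p:
--             for j in range(part):
--                 c[j] += 1
--         return c == p
--
--     return [p for p in parts(n, n) if self_conjugate(p)]
-- ===== Notes on version B (the rewrite author's own statement) =====
-- stated objective: alternative
-- what changed: A backtracks over a shared mutable path, collecting into a result list, and tests self-conjugacy by materialising a width x height 0/1 grid and comparing grid[i][j] with grid[j][i]; B is a pure recursion that returns the suffix lists of each partition and tests self-conjugacy by computing the conjugate partition as a count vector in one pass and comparing it with the partition. Pre_ excludes only n = 0, where both A and B raise IndexError.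
import Mathlib
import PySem

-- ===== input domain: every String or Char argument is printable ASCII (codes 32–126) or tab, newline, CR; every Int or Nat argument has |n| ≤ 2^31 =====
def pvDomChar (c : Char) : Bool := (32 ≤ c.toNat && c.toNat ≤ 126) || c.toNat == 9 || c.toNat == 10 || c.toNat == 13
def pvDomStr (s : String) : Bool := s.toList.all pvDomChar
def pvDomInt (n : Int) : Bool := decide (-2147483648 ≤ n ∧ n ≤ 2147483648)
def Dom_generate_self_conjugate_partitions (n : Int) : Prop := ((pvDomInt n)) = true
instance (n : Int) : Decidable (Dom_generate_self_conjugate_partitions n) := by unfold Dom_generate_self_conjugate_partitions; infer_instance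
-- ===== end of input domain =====

-- B replaces A's backtracking over a shared mutable path plus a per-candidate grid-symmetry
-- test by a pure recursion returning the suffix lists and a conjugate count-vector comparison
-- (objective: alternative).

-- ===== PORT A =====

-- is_self_conjugate, second phase: inner loop 'for j in range(partition[i])' with early returns
def pvCheckRowA (grid : List (List Int)) (i : Nat) : List Int → Bool
  | [] => true
  | j :: js =>
    if (grid.length : Int) ≤ j then false
    else if ((grid.getD j.toNat []).length : Int) ≤ (i : Int) then false
    else if ((grid.getD i []).getD j.toNat 0) ≠ ((grid.getD j.toNat []).getD i 0) then false
    else pvCheckRowA grid i js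

-- is_self_conjugate, second phase: outer loop 'for i in range(height)'
def pvCheckAllA (grid : List (List Int)) (p : List Int) : List Nat → Bool
  | [] => true
  | i :: is =>
    if pvCheckRowA grid i (PySem.List.pyRange 0 (p.getD i 0) 1) then pvCheckAllA grid p is
    else false

-- is_self_conjugate: build the 0/1 grid, then check symmetry cell by cell
def pvIsSelfConjA (p : List Int) : Bool :=
  let width : Int := PySem.List.pyGetD p 0 0   -- partition[0]; p is nonempty wherever Python reaches this
  let height : Nat := p.length
  let grid0 : List (List Int) := List.replicate height (List.replicate width.toNat 0)
  let grid := (List.range height).foldl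
      (fun g i => (PySem.List.pyRange 0 (p.getD i 0) 1).foldl
         (fun g j => g.modify i (fun row => row.set j.toNat 1)) g) grid0
  pvCheckAllA grid p (List.range height)

-- helper(n, max_val, path, result): the loop takes the recursive call as an argument;
-- fuel only makes the recursion total (n.toNat is always enough fuel)
def pvHelperLoopA (rec : Int → Int → List Int → List (List Int) → List (List Int))
    (n : Int) : List Int → List Int → List (List Int) → List (List Int)
  | [], _, result => result
  | i :: rest, path, result =>
    let result' :=
      if path.isEmpty || decide (i ≤ path.getLastD 0) then rec (n - i) i (path ++ [i]) result
      else result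
    pvHelperLoopA rec n rest path result'

def pvHelperA (fuel : Nat) (n mx : Int) (path : List Int) (result : List (List Int)) :
    List (List Int) :=
  if n = 0 then (if pvIsSelfConjA path then result ++ [path] else result)
  else
    pvHelperLoopA
      (match fuel with
       | 0 => fun _ _ _ r => r      -- fuel guard, never reached from the top-level call
       | f + 1 => pvHelperA f)
      n (PySem.List.pyRange (min n mx) 0 (-1)) path result

def generate_self_conjugate_partitions (n : Int) : List (List Int) :=
  pvHelperA n.toNat n n [] []

-- ===== PORT B =====

-- parts(n, mx): all partitions of n into parts ≤ mx, DFS order; the loop takes the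
-- recursive call as an argument; fuel only makes the recursion total
def pvPartsLoopB (rec : Int → Int → List (List Int)) (n : Int) :
    List Int → List (List Int) → List (List Int)
  | [], out => out
  | i :: rest, out =>
    let out' := (rec (n - i) i).foldl (fun out r => out ++ [i :: r]) out
    pvPartsLoopB rec n rest out'

def pvPartsB (fuel : Nat) (n mx : Int) : List (List Int) :=
  if n = 0 then [[]]
  else
    pvPartsLoopB
      (match fuel with
       | 0 => fun _ _ => []         -- fuel guard, never reached from the top-level call
       | f + 1 => pvPartsB f)
      n (PySem.List.pyRange (min n mx) 0 (-1)) []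

-- self_conjugate(p): compare p with its conjugate, computed as a count vector in one pass
def pvSelfConjB (p : List Int) : Bool :=
  let c0 : List Int := List.replicate (PySem.List.pyGetD p 0 0).toNat 0
  let c := p.foldl
      (fun c part => (PySem.List.pyRange 0 part 1).foldl
         (fun c j => c.modify j.toNat (· + 1)) c) c0
  c == p

def generate_self_conjugate_partitions_alt (n : Int) : List (List Int) :=
  (pvPartsB n.toNat n n).filter pvSelfConjB

-- ===== PRECONDITION & SPEC =====
-- Pre_ excludes only n = 0, where Python A raises IndexError (partition[0] on the empty path).
def Pre_generate_self_conjugate_partitions (n : Int) : Prop := n ≠ 0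
instance (n : Int) : Decidable (Pre_generate_self_conjugate_partitions n) := by
  unfold Pre_generate_self_conjugate_partitions; infer_instance
def pvWitness_generate_self_conjugate_partitions : Int := 8

def Spec_generate_self_conjugate_partitions (n : Int) (out : List (List Int)) : Prop :=
  out = generate_self_conjugate_partitions_alt n
instance (n : Int) (out : List (List Int)) :
    Decidable (Spec_generate_self_conjugate_partitions n out) := by
  unfold Spec_generate_self_conjugate_partitions; infer_instance

-- ===== CLAIM (what is proved, stated in full; the proofs are below) =====
def Claim_equal_generate_self_conjugate_partitions : Prop :=
  ∀ (n : Int), Dom_generate_self_conjugate_partitions n →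
    Pre_generate_self_conjugate_partitions n →
    Spec_generate_self_conjugate_partitions n (generate_self_conjugate_partitions n)

-- ===== LEMMAS AND PROOFS =====

-- ---- generic getD facts ----
theorem pv_getD_set (l : List Int) (k j : Nat) (v d : Int) :
    (l.set k v).getD j d = if k = j ∧ k < l.length then v else l.getD j d := by
  by_cases h1 : k = j
  · subst h1
    by_cases h2 : k < l.length
    · simp [List.getD_eq_getElem?_getD, List.getElem?_set, h2]
    · simp [List.getD_eq_getElem?_getD, List.getElem?_set, h2,
        List.getElem?_eq_none (by omega : l.length ≤ k)]
  · simp [List.getD_eq_getElem?_getD, List.getElem?_set, h1]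

theorem pv_getD_modify (l : List Int) (k j : Nat) (f : Int → Int) (d : Int) :
    (l.modify k f).getD j d = if k = j ∧ k < l.length then f (l.getD j d) else l.getD j d := by
  by_cases h1 : k = j
  · subst h1
    by_cases h2 : k < l.length
    · simp [List.getD_eq_getElem?_getD, List.getElem?_modify, List.getElem?_eq_getElem h2, h2,
        List.getD_eq_getElem l d h2]
    · simp [List.getD_eq_getElem?_getD, List.getElem?_modify, h2,
        List.getElem?_eq_none (by omega : l.length ≤ k)]
  · simp [List.getD_eq_getElem?_getD, List.getElem?_modify, h1]

theorem pv_getD_modify_rows (l : List (List Int)) (k j : Nat) (f : List Int → List Int) :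
    (l.modify k f).getD j [] = if k = j ∧ k < l.length then f (l.getD j []) else l.getD j [] := by
  by_cases h1 : k = j
  · subst h1
    by_cases h2 : k < l.length
    · simp [List.getD_eq_getElem?_getD, List.getElem?_modify, List.getElem?_eq_getElem h2, h2,
        List.getD_eq_getElem l [] h2]
    · simp [List.getD_eq_getElem?_getD, List.getElem?_modify, h2,
        List.getElem?_eq_none (by omega : l.length ≤ k)]
  · simp [List.getD_eq_getElem?_getD, List.getElem?_modify, h1]

theorem pv_foldl_length_inv {α β : Type} (l : List β) (step : List α → β → List α)
    (h : ∀ g x, (step g x).length = g.length) :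
    ∀ g : List α, (l.foldl step g).length = g.length := by
  intro g
  induction l generalizing g with
  | nil => rfl
  | cons x xs ih => rw [List.foldl_cons, ih (step g x), h]

-- ---- the inner row fold of A: set positions 0 .. m-1 to 1 ----
theorem pv_row_fold_getD_aux (k : Nat) :
    ∀ (a m : Int), 0 ≤ a → (m - a).toNat = k → ∀ (row : List Int) (j' : Nat),
      ((PySem.List.pyRange a m 1).foldl (fun r j => r.set j.toNat 1) row).getD j' 0
        = if a ≤ (j' : Int) ∧ (j' : Int) < m ∧ j' < row.length then 1 else row.getD j' 0 := by
  induction k with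
  | zero =>
    intro a m ha hk row j'
    rw [PySem.List.pyRange_one_eq_nil (by omega), List.foldl_nil,
      if_neg (by rintro ⟨h1, h2, -⟩; omega)]
  | succ k ih =>
    intro a m ha hk row j'
    rw [PySem.List.pyRange_one_cons (by omega : a < m), List.foldl_cons,
      ih (a + 1) m (by omega) (by omega), List.length_set, pv_getD_set]
    split_ifs <;> first | rfl | (exfalso; omega)

theorem pv_row_fold_getD (m : Int) (row : List Int) (j' : Nat) :
    ((PySem.List.pyRange 0 m 1).foldl (fun r j => r.set j.toNat 1) row).getD j' 0
      = if (j' : Int) < m ∧ j' < row.length then 1 else row.getD j' 0 := by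
  have h := pv_row_fold_getD_aux (m - 0).toNat 0 m le_rfl rfl row j'
  rw [h]
  split_ifs <;> first | rfl | (exfalso; omega)

theorem pv_row_fold_length (m : Int) (row : List Int) :
    ((PySem.List.pyRange 0 m 1).foldl (fun r j => r.set j.toNat 1) row).length = row.length := by
  exact pv_foldl_length_inv _ _ (fun g x => List.length_set) row

-- ---- the inner count fold of B: add 1 at positions 0 .. m-1 ----
theorem pv_cnt_fold_getD_aux (k : Nat) :
    ∀ (a m : Int), 0 ≤ a → (m - a).toNat = k → ∀ (c : List Int) (j' : Nat),
      ((PySem.List.pyRange a m 1).foldl (fun c j => c.modify j.toNat (· + 1)) c).getD j' 0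
        = if a ≤ (j' : Int) ∧ (j' : Int) < m ∧ j' < c.length then c.getD j' 0 + 1
          else c.getD j' 0 := by
  induction k with
  | zero =>
    intro a m ha hk c j'
    rw [PySem.List.pyRange_one_eq_nil (by omega), List.foldl_nil,
      if_neg (by rintro ⟨h1, h2, -⟩; omega)]
  | succ k ih =>
    intro a m ha hk c j'
    rw [PySem.List.pyRange_one_cons (by omega : a < m), List.foldl_cons,
      ih (a + 1) m (by omega) (by omega), List.length_modify, pv_getD_modify]
    split_ifs <;> first | rfl | (exfalso; omega)

theorem pv_cnt_fold_getD (m : Int) (c : List Int) (j' : Nat) :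
    ((PySem.List.pyRange 0 m 1).foldl (fun c j => c.modify j.toNat (· + 1)) c).getD j' 0
      = if (j' : Int) < m ∧ j' < c.length then c.getD j' 0 + 1 else c.getD j' 0 := by
  have h := pv_cnt_fold_getD_aux (m - 0).toNat 0 m le_rfl rfl c j'
  rw [h]
  split_ifs <;> first | rfl | (exfalso; omega)

theorem pv_cnt_fold_length (m : Int) (c : List Int) :
    ((PySem.List.pyRange 0 m 1).foldl (fun c j => c.modify j.toNat (· + 1)) c).length
      = c.length := by
  exact pv_foldl_length_inv _ _ (fun g x => List.length_modify _ _ _) c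

-- ---- A's grid ----
theorem pv_inner_fold_getD (js : List Int) (i : Nat) :
    ∀ (g : List (List Int)) (k : Nat),
      ((js.foldl (fun g j => g.modify i (fun row => row.set j.toNat 1)) g).getD k [])
        = if i = k ∧ k < g.length then js.foldl (fun r j => r.set j.toNat 1) (g.getD k [])
          else g.getD k [] := by
  induction js with
  | nil =>
    intro g k
    rw [List.foldl_nil, List.foldl_nil]
    split_ifs <;> rfl
  | cons j js ih =>
    intro g k
    rw [List.foldl_cons, ih, List.length_modify, pv_getD_modify_rows, List.foldl_cons]
    split_ifs <;> first | rfl | (exfalso; omega)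

theorem pv_inner_fold_length (js : List Int) (i : Nat) (g : List (List Int)) :
    (js.foldl (fun g j => g.modify i (fun row => row.set j.toNat 1)) g).length = g.length := by
  exact pv_foldl_length_inv _ _ (fun g x => List.length_modify _ _ _) g

theorem pv_grid_fold_getD (p : List Int) :
    ∀ (l : List Nat) (g : List (List Int)) (k : Nat), l.Nodup →
      ((l.foldl (fun g i => (PySem.List.pyRange 0 (p.getD i 0) 1).foldl
           (fun g j => g.modify i (fun row => row.set j.toNat 1)) g) g).getD k [])
        = if k ∈ l ∧ k < g.length then
            (PySem.List.pyRange 0 (p.getD k 0) 1).foldl (fun r j => r.set j.toNat 1) (g.getD k [])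
          else g.getD k [] := by
  intro l
  induction l with
  | nil =>
    intro g k hnd
    rw [List.foldl_nil, if_neg (by rintro ⟨h, -⟩; exact (List.not_mem_nil h))]
  | cons i rest ih =>
    intro g k hnd
    rw [List.foldl_cons, ih _ _ (List.nodup_cons.mp hnd).2, pv_inner_fold_length,
      pv_inner_fold_getD]
    by_cases hk : k < g.length
    · by_cases hkr : k ∈ rest
      · have hik : ¬ (i = k) := fun h => (List.nodup_cons.mp hnd).1 (h ▸ hkr)
        rw [if_pos ⟨hkr, hk⟩, if_neg (by rintro ⟨h, -⟩; exact hik h),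
          if_pos ⟨List.mem_cons_of_mem i hkr, hk⟩]
      · by_cases hik : i = k
        · subst hik
          rw [if_neg (by rintro ⟨h, -⟩; exact hkr h), if_pos ⟨rfl, hk⟩,
            if_pos ⟨List.mem_cons_self, hk⟩]
        · rw [if_neg (by rintro ⟨h, -⟩; exact hkr h), if_neg (by rintro ⟨h, -⟩; exact hik h),
            if_neg (fun hmem => (List.mem_cons.mp hmem.1).elim
              (fun h' => hik h'.symm) (fun h' => hkr h'))]
    · rw [if_neg (by rintro ⟨-, h⟩; exact hk h), if_neg (by rintro ⟨-, h⟩; exact hk h),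
        if_neg (by rintro ⟨-, h⟩; exact hk h)]

theorem pv_grid_fold_length (p : List Int) (l : List Nat) (g : List (List Int)) :
    (l.foldl (fun g i => (PySem.List.pyRange 0 (p.getD i 0) 1).foldl
        (fun g j => g.modify i (fun row => row.set j.toNat 1)) g) g).length = g.length := by
  exact pv_foldl_length_inv _ _ (fun g x => pv_inner_fold_length _ _ _) g

-- ---- A's check loops, read as universally quantified conditions ----
theorem pv_checkRowA_iff (grid : List (List Int)) (i : Nat) (js : List Int) :
    pvCheckRowA grid i js = true
      ↔ ∀ j ∈ js, (j < (grid.length : Int) ∧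
          (i : Int) < ((grid.getD j.toNat []).length : Int) ∧
          (grid.getD i []).getD j.toNat 0 = (grid.getD j.toNat []).getD i 0) := by
  induction js with
  | nil => simp [pvCheckRowA]
  | cons j js ih =>
    simp only [pvCheckRowA, List.forall_mem_cons]
    split_ifs with h1 h2 h3
    · constructor
      · intro h; simp at h
      · intro h; exfalso; have := h.1.1; omega
    · constructor
      · intro h; simp at h
      · intro h; exfalso; have := h.1.2.1; omega
    · constructor
      · intro h; simp at h
      · intro h; exact absurd h.1.2.2 h3
    · rw [ih]
      constructor
      · intro h; exact ⟨⟨by omega, by omega, not_not.mp h3⟩, h⟩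
      · intro h; exact h.2

theorem pv_checkAllA_iff (grid : List (List Int)) (p : List Int) (l : List Nat) :
    pvCheckAllA grid p l = true
      ↔ ∀ i ∈ l, pvCheckRowA grid i (PySem.List.pyRange 0 (p.getD i 0) 1) = true := by
  induction l with
  | nil => simp [pvCheckAllA]
  | cons i l ih =>
    simp only [pvCheckAllA, List.forall_mem_cons]
    split_ifs with h1
    · rw [ih]; exact ⟨fun h => ⟨h1, h⟩, fun h => h.2⟩
    · constructor
      · intro h; simp at h
      · intro h; exact absurd h.1 h1

theorem pv_getD_replicate_zero (w j' : Nat) : (List.replicate w (0 : Int)).getD j' 0 = 0 := by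
  by_cases h : j' < w
  · exact List.getD_replicate _ h
  · rw [List.getD_eq_getElem?_getD, List.getElem?_eq_none (by simp; omega)]
    rfl

theorem pv_gridrow (p : List Int) (w : Nat) (k : Nat) (hk : k < p.length) :
    ((List.range p.length).foldl (fun g i => (PySem.List.pyRange 0 (p.getD i 0) 1).foldl
        (fun g j => g.modify i (fun row => row.set j.toNat 1)) g)
      (List.replicate p.length (List.replicate w (0 : Int)))).getD k []
    = (PySem.List.pyRange 0 (p.getD k 0) 1).foldl (fun r j => r.set j.toNat 1)
        (List.replicate w (0 : Int)) := by
  rw [pv_grid_fold_getD p _ _ k List.nodup_range,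
    if_pos ⟨List.mem_range.mpr hk, by simp [hk]⟩, List.getD_replicate _ hk]

theorem pv_gridlen (p : List Int) (w : Nat) :
    ((List.range p.length).foldl (fun g i => (PySem.List.pyRange 0 (p.getD i 0) 1).foldl
        (fun g j => g.modify i (fun row => row.set j.toNat 1)) g)
      (List.replicate p.length (List.replicate w (0 : Int)))).length = p.length := by
  rw [pv_grid_fold_length, List.length_replicate]

-- ---- the symmetry property A decides ----
def pvPropA (p : List Int) : Prop :=
  ∀ i : Nat, i < p.length → ∀ j : Int, 0 ≤ j → j < p.getD i 0 →
    (j < (p.length : Int) ∧ (i : Int) < PySem.List.pyGetD p 0 0 ∧ (i : Int) < p.getD j.toNat 0)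

theorem pv_isSelfConjA_iff (p : List Int) (hne : p ≠ [])
    (hsort : p.Pairwise (fun a b => b ≤ a)) (hpos : ∀ x ∈ p, 1 ≤ x) :
    (pvIsSelfConjA p = true ↔ pvPropA p) := by
  have hlen : 0 < p.length := by
    cases p with
    | nil => exact absurd rfl hne
    | cons a t => simp
  have hp0 : PySem.List.pyGetD p 0 0 = p.getD 0 0 := by
    rw [PySem.List.pyGetD_of_nonneg p 0 le_rfl]
    rfl
  have hp0pos : 1 ≤ p.getD 0 0 := by
    rw [List.getD_eq_getElem p 0 hlen]; exact hpos _ (List.getElem_mem hlen)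
  have hle : ∀ i, i < p.length → p.getD i 0 ≤ p.getD 0 0 := by
    intro i hi
    rcases Nat.eq_zero_or_pos i with h0 | h0
    · subst h0; exact le_rfl
    · rw [List.getD_eq_getElem p 0 hi, List.getD_eq_getElem p 0 hlen]
      exact List.pairwise_iff_getElem.mp hsort 0 i hlen hi h0
  simp only [pvIsSelfConjA]
  rw [pv_checkAllA_iff]
  set w : Nat := (PySem.List.pyGetD p 0 0).toNat with hwdef
  have hw : (w : Int) = p.getD 0 0 := by
    rw [hwdef, hp0]; exact Int.toNat_of_nonneg (by omega)
  have hrow := pv_gridrow p w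
  have hglen := pv_gridlen p w
  have hrowlen : ∀ k, k < p.length →
      ((((List.range p.length).foldl (fun g i => (PySem.List.pyRange 0 (p.getD i 0) 1).foldl
          (fun g j => g.modify i (fun row => row.set j.toNat 1)) g)
        (List.replicate p.length (List.replicate w (0 : Int)))).getD k []).length) = w := by
    intro k hk
    rw [hrow k hk, pv_row_fold_length, List.length_replicate]
  have hrowval : ∀ k, k < p.length → ∀ j' : Nat,
      ((((List.range p.length).foldl (fun g i => (PySem.List.pyRange 0 (p.getD i 0) 1).foldl
          (fun g j => g.modify i (fun row => row.set j.toNat 1)) g)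
        (List.replicate p.length (List.replicate w (0 : Int)))).getD k []).getD j' 0)
      = if ((j' : Int) < p.getD k 0 ∧ j' < w) then 1 else 0 := by
    intro k hk j'
    rw [hrow k hk, pv_row_fold_getD, List.length_replicate, pv_getD_replicate_zero]
  constructor
  · intro H i hi j hj0 hjpi
    have hrowH := (pv_checkRowA_iff _ i _).mp (H i (List.mem_range.mpr hi)) j
      (PySem.List.mem_pyRange_one.mpr ⟨hj0, hjpi⟩)
    obtain ⟨c1, c2, c3⟩ := hrowH
    rw [hglen] at c1
    have hjn : j.toNat < p.length := by omega
    rw [hrowlen j.toNat hjn] at c2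
    rw [hrowval i hi j.toNat, hrowval j.toNat hjn i] at c3
    rw [if_pos ⟨by omega, by have := hle i hi; omega⟩] at c3
    refine ⟨c1, by rw [hp0]; omega, ?_⟩
    by_cases hc : ((i : Int) < p.getD j.toNat 0 ∧ i < w)
    · exact hc.1
    · rw [if_neg hc] at c3; exact absurd c3 (by norm_num)
  · intro H i himem
    have hi := List.mem_range.mp himem
    rw [pv_checkRowA_iff]
    intro j hjmem
    obtain ⟨hj0, hjpi⟩ := PySem.List.mem_pyRange_one.mp hjmem
    obtain ⟨d1, d2, d3⟩ := H i hi j hj0 hjpi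
    rw [hp0] at d2
    have hjn : j.toNat < p.length := by omega
    refine ⟨by rw [hglen]; omega, by rw [hrowlen j.toNat hjn]; omega, ?_⟩
    rw [hrowval i hi j.toNat, hrowval j.toNat hjn i,
      if_pos ⟨by omega, by have := hle i hi; omega⟩, if_pos ⟨by omega, by omega⟩]

-- ---- B's count vector is the conjugate partition ----
theorem pv_conj_getD (q : List Int) :
    ∀ (c : List Int) (j' : Nat), j' < c.length →
      ((q.foldl (fun c part => (PySem.List.pyRange 0 part 1).foldl
           (fun c j => c.modify j.toNat (· + 1)) c) c).getD j' 0)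
        = c.getD j' 0 + (q.countP (fun x => decide ((j' : Int) < x)) : Int) := by
  induction q with
  | nil => intro c j' h; simp
  | cons part q ih =>
    intro c j' h
    rw [List.foldl_cons, ih _ _ (by rw [pv_cnt_fold_length]; exact h), pv_cnt_fold_getD,
      List.countP_cons]
    by_cases hp : (j' : Int) < part
    · rw [if_pos ⟨hp, h⟩, if_pos (by simpa using hp)]
      push_cast
      ring
    · rw [if_neg (by rintro ⟨h1, -⟩; exact hp h1), if_neg (by simpa using hp)]
      push_cast
      ring

theorem pv_conj_length (q : List Int) (c : List Int) :
    (q.foldl (fun c part => (PySem.List.pyRange 0 part 1).foldl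
        (fun c j => c.modify j.toNat (· + 1)) c) c).length = c.length := by
  exact pv_foldl_length_inv _ _ (fun c part => pv_cnt_fold_length part c) c

-- ---- countP against a nonincreasing list ----
theorem pv_countP_sorted (j : Int) :
    ∀ (p : List Int), p.Pairwise (fun a b => b ≤ a) →
      (p.countP (fun x => decide (j < x)) ≤ p.length ∧
       (∀ i, i < p.countP (fun x => decide (j < x)) → j < p.getD i 0) ∧
       (∀ i, p.countP (fun x => decide (j < x)) ≤ i → i < p.length → p.getD i 0 ≤ j)) := by
  intro p
  induction p with
  | nil => intro _; simp
  | cons a t ih =>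
    intro hp
    obtain ⟨hat, ht⟩ := List.pairwise_cons.mp hp
    obtain ⟨ih1, ih2, ih3⟩ := ih ht
    by_cases hja : j < a
    · rw [List.countP_cons, if_pos (by simpa using hja)]
      refine ⟨by simp only [List.length_cons]; omega, ?_, ?_⟩
      · intro i hi
        cases i with
        | zero => simpa using hja
        | succ i => rw [List.getD_cons_succ]; exact ih2 i (by omega)
      · intro i hi1 hi2
        cases i with
        | zero => omega
        | succ i =>
          rw [List.getD_cons_succ]
          exact ih3 i (by omega) (by simpa using hi2)
    · have h0 : t.countP (fun x => decide (j < x)) = 0 :=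
        List.countP_eq_zero.mpr (fun x hx => by
          have := hat x hx
          simp only [decide_eq_true_eq]
          omega)
      rw [List.countP_cons, if_neg (by simpa using hja), h0]
      refine ⟨by simp, by omega, ?_⟩
      intro i _ hi2
      cases i with
      | zero => simpa using (by omega : a ≤ j)
      | succ i =>
        rw [List.getD_cons_succ]
        have hm : t.getD i 0 ∈ t := by
          rw [List.getD_eq_getElem t 0 (by simpa using hi2)]
          exact List.getElem_mem _
        have := hat _ hm
        omega

-- ---- the two checks agree on every partition A enumerates ----
theorem pv_check_eq (p : List Int) (hne : p ≠ [])
    (hsort : p.Pairwise (fun a b => b ≤ a)) (hpos : ∀ x ∈ p, 1 ≤ x) :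
    pvIsSelfConjA p = pvSelfConjB p := by
  have hlen : 0 < p.length := by
    cases p with
    | nil => exact absurd rfl hne
    | cons a t => simp
  have hp0 : PySem.List.pyGetD p 0 0 = p.getD 0 0 := by
    rw [PySem.List.pyGetD_of_nonneg p 0 le_rfl]
    rfl
  have hp0pos : 1 ≤ p.getD 0 0 := by
    rw [List.getD_eq_getElem p 0 hlen]; exact hpos _ (List.getElem_mem hlen)
  have hle : ∀ i, i < p.length → p.getD i 0 ≤ p.getD 0 0 := by
    intro i hi
    rcases Nat.eq_zero_or_pos i with h0 | h0
    · subst h0; exact le_rfl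
    · rw [List.getD_eq_getElem p 0 hi, List.getD_eq_getElem p 0 hlen]
      exact List.pairwise_iff_getElem.mp hsort 0 i hlen hi h0
  have hposD : ∀ i, i < p.length → 1 ≤ p.getD i 0 := by
    intro i hi; rw [List.getD_eq_getElem p 0 hi]; exact hpos _ (List.getElem_mem hi)
  set w : Nat := (PySem.List.pyGetD p 0 0).toNat with hwdef
  have hw : (w : Int) = p.getD 0 0 := by
    rw [hwdef, hp0]; exact Int.toNat_of_nonneg (by omega)
  have hclen : (p.foldl (fun c part => (PySem.List.pyRange 0 part 1).foldl
      (fun c j => c.modify j.toNat (· + 1)) c) (List.replicate w (0 : Int))).length = w := by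
    rw [pv_conj_length, List.length_replicate]
  have hcval : ∀ j' : Nat, j' < w →
      (p.foldl (fun c part => (PySem.List.pyRange 0 part 1).foldl
        (fun c j => c.modify j.toNat (· + 1)) c) (List.replicate w (0 : Int))).getD j' 0
      = (p.countP (fun x => decide ((j' : Int) < x)) : Int) := by
    intro j' hj'
    rw [pv_conj_getD p _ j' (by simp [hj']), pv_getD_replicate_zero, zero_add]
  have hBiff : pvSelfConjB p = true ↔
      (p.foldl (fun c part => (PySem.List.pyRange 0 part 1).foldl
        (fun c j => c.modify j.toNat (· + 1)) c) (List.replicate w (0 : Int))) = p := by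
    simp only [pvSelfConjB, hwdef]
    exact beq_iff_eq
  have hAiff := pv_isSelfConjA_iff p hne hsort hpos
  have main : pvPropA p ↔
      (p.foldl (fun c part => (PySem.List.pyRange 0 part 1).foldl
        (fun c j => c.modify j.toNat (· + 1)) c) (List.replicate w (0 : Int))) = p := by
    constructor
    · intro HA
      have hwh : w = p.length := by
        have h1 := HA (p.length - 1) (by omega) 0 le_rfl
          (by have := hposD (p.length - 1) (by omega); omega)
        have h2 := HA 0 hlen (p.getD 0 0 - 1) (by omega) (by omega)
        rw [hp0] at h1 h2
        have e1 := h1.2.1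
        have e2 := h2.1
        omega
      apply List.ext_getElem (by rw [hclen, hwh])
      intro k hk1 hk2
      obtain ⟨f1, f2, f3⟩ := pv_countP_sorted ((k : Nat) : Int) p hsort
      have e1 : ¬ ((p.countP (fun x => decide ((k : Int) < x)) : Int) < p.getD k 0) := by
        intro hlt
        have hKlen : p.countP (fun x => decide ((k : Int) < x)) < p.length := by
          have := hle k hk2; omega
        have hf3 := f3 _ le_rfl hKlen
        have hPA := HA k hk2 (p.countP (fun x => decide ((k : Int) < x)) : Int) (by omega) hlt
        rw [Int.toNat_natCast] at hPA
        have := hPA.2.2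
        omega
      have e2 : ¬ (p.getD k 0 < (p.countP (fun x => decide ((k : Int) < x)) : Int)) := by
        intro hlt
        have hpj : 1 ≤ p.getD k 0 := hposD k hk2
        have hmK : (p.getD k 0).toNat < p.countP (fun x => decide ((k : Int) < x)) := by omega
        have hf2 := f2 _ hmK
        have hmlen : (p.getD k 0).toNat < p.length := by omega
        have hPA := HA (p.getD k 0).toNat hmlen (k : Int) (by omega) hf2
        rw [Int.toNat_natCast] at hPA
        have := hPA.2.2
        omega
      rw [← List.getD_eq_getElem _ 0 hk1, ← List.getD_eq_getElem p 0 hk2,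
        hcval k (by omega : k < w)]
      omega
    · intro HC
      have hwh : w = p.length := by rw [← hclen, HC]
      have hval : ∀ k : Nat, k < p.length →
          (p.countP (fun x => decide ((k : Int) < x)) : Int) = p.getD k 0 := by
        intro k hk
        rw [← hcval k (by omega), HC]
      intro i hi j hj0 hjpi
      have hjlt : j < (p.length : Int) := by have := hle i hi; omega
      refine ⟨hjlt, by rw [hp0]; omega, ?_⟩
      have hjn : j.toNat < p.length := by omega
      by_contra hcon
      obtain ⟨f1, f2, f3⟩ := pv_countP_sorted ((j.toNat : Nat) : Int) p hsort
      have hKi := hval j.toNat hjn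
      have hji : ((j.toNat : Nat) : Int) = j := by omega
      have hle' : p.countP (fun x => decide (((j.toNat : Nat) : Int) < x)) ≤ i := by
        rw [hji] at hKi ⊢
        omega
      have := f3 i hle' hi
      omega
  cases hA : pvIsSelfConjA p <;> cases hB : pvSelfConjB p
  · rfl
  · have := hAiff.mpr (main.mpr (hBiff.mp hB))
    rw [hA] at this
    simp at this
  · have := hBiff.mpr (main.mp (hAiff.mp hA))
    rw [hB] at this
    simp at this
  · rfl

-- ---- B's enumeration: explicit form and membership invariants ----
theorem pv_partsLoopB_eq (rec : Int → Int → List (List Int)) (n : Int) :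
    ∀ (is : List Int) (out : List (List Int)),
      pvPartsLoopB rec n is out = out ++ is.flatMap (fun i => (rec (n - i) i).map (i :: ·)) := by
  intro is
  induction is with
  | nil => intro out; simp [pvPartsLoopB]
  | cons i rest ih =>
    intro out
    rw [pvPartsLoopB]
    rw [PySem.List.foldl_append_singleton_eq_map (fun r => i :: r)]
    rw [ih]
    simp [List.append_assoc]

theorem pv_partsB_mem :
    ∀ (fuel : Nat) (n mx : Int) (s : List Int), s ∈ pvPartsB fuel n mx →
      (s.Pairwise (fun a b => b ≤ a) ∧ (∀ x ∈ s, 1 ≤ x ∧ x ≤ mx) ∧ (n ≠ 0 → s ≠ [])) := by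
  intro fuel
  induction fuel with
  | zero =>
    intro n mx s hs
    rw [pvPartsB] at hs
    by_cases hn : n = 0
    · rw [if_pos hn] at hs
      simp only [List.mem_singleton] at hs
      subst hs
      exact ⟨List.Pairwise.nil, by simp, fun hn' => absurd hn hn'⟩
    · rw [if_neg hn, pv_partsLoopB_eq] at hs
      simp at hs
  | succ f ih =>
    intro n mx s hs
    rw [pvPartsB] at hs
    by_cases hn : n = 0
    · rw [if_pos hn] at hs
      simp only [List.mem_singleton] at hs
      subst hs
      exact ⟨List.Pairwise.nil, by simp, fun hn' => absurd hn hn'⟩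
    · rw [if_neg hn, pv_partsLoopB_eq] at hs
      simp only [List.nil_append, List.mem_flatMap, List.mem_map] at hs
      obtain ⟨i, hi, t, ht, rfl⟩ := hs
      obtain ⟨hi1, hi2⟩ := PySem.List.mem_pyRange_neg_one.mp hi
      obtain ⟨tp, tb, -⟩ := ih (n - i) i t ht
      refine ⟨List.pairwise_cons.mpr ⟨fun x hx => (tb x hx).2, tp⟩, ?_, by simp⟩
      rw [List.forall_mem_cons]
      refine ⟨⟨by omega, by omega⟩, fun x hx => ⟨(tb x hx).1, by have := (tb x hx).2; omega⟩⟩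

-- ---- A's backtracking = filter of B's enumeration ----
theorem pv_helperLoopA_eq
    (recA : Int → Int → List Int → List (List Int) → List (List Int))
    (recB : Int → Int → List (List Int))
    (hrec : ∀ n' mx' path' result',
      (path' = [] ∨ ∃ L, path'.getLast? = some L ∧ mx' ≤ L) →
      recA n' mx' path' result'
        = result' ++ ((recB n' mx').map (path' ++ ·)).filter pvIsSelfConjA)
    (n : Int) :
    ∀ (is : List Int) (path : List Int) (result : List (List Int)),
      (∀ i ∈ is, (path.isEmpty || decide (i ≤ path.getLastD 0)) = true) →
      pvHelperLoopA recA n is path result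
        = result ++ ((pvPartsLoopB recB n is []).map (path ++ ·)).filter pvIsSelfConjA := by
  intro is
  induction is with
  | nil =>
    intro path result hcond
    simp [pvHelperLoopA, pvPartsLoopB]
  | cons i rest ih =>
    intro path result hcond
    rw [pvHelperLoopA]
    simp only [hcond i List.mem_cons_self, if_true]
    rw [hrec (n - i) i (path ++ [i]) result
      (Or.inr ⟨i, by simp [List.getLast?_append], le_rfl⟩)]
    rw [ih path _ (fun i' hi' => hcond i' (List.mem_cons_of_mem _ hi'))]
    rw [pv_partsLoopB_eq, pv_partsLoopB_eq]
    have hac : ∀ s : List Int, (path ++ [i]) ++ s = path ++ i :: s := fun s => by simp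
    simp only [List.flatMap_cons, List.nil_append, List.map_append, List.filter_append,
      List.map_map, List.append_assoc, hac]
    rfl

theorem pv_helperA_eq :
    ∀ (fuel : Nat) (n mx : Int) (path : List Int) (result : List (List Int)),
      (path = [] ∨ ∃ L, path.getLast? = some L ∧ mx ≤ L) →
      pvHelperA fuel n mx path result
        = result ++ ((pvPartsB fuel n mx).map (path ++ ·)).filter pvIsSelfConjA := by
  intro fuel
  induction fuel with
  | zero =>
    intro n mx path result hinv
    rw [pvHelperA, pvPartsB]
    by_cases hn : n = 0
    · rw [if_pos hn, if_pos hn]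
      simp only [List.map_cons, List.map_nil, List.append_nil, List.filter]
      split_ifs with h <;> simp [h]
    · rw [if_neg hn, if_neg hn]
      apply pv_helperLoopA_eq (fun _ _ _ r => r) (fun _ _ => [])
        (fun n' mx' path' result' _ => by simp)
      intro i hi
      obtain ⟨hi1, hi2⟩ := PySem.List.mem_pyRange_neg_one.mp hi
      rcases hinv with h | ⟨L, hL, hml⟩
      · subst h; rfl
      · have h2 : i ≤ path.getLastD 0 := by
          rw [List.getLastD_eq_getLast?, hL, Option.getD_some]
          omega
        rw [List.getLastD_eq_getLast?] at h2
        simp [h2]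
  | succ f ihf =>
    intro n mx path result hinv
    rw [pvHelperA, pvPartsB]
    by_cases hn : n = 0
    · rw [if_pos hn, if_pos hn]
      simp only [List.map_cons, List.map_nil, List.append_nil, List.filter]
      split_ifs with h <;> simp [h]
    · rw [if_neg hn, if_neg hn]
      apply pv_helperLoopA_eq (pvHelperA f) (pvPartsB f)
        (fun n' mx' path' result' hinv' => ihf n' mx' path' result' hinv')
      intro i hi
      obtain ⟨hi1, hi2⟩ := PySem.List.mem_pyRange_neg_one.mp hi
      rcases hinv with h | ⟨L, hL, hml⟩
      · subst h; rfl
      · have h2 : i ≤ path.getLastD 0 := by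
          rw [List.getLastD_eq_getLast?, hL, Option.getD_some]
          omega
        rw [List.getLastD_eq_getLast?] at h2
        simp [h2]

-- ===== VERDICT (by name: the statement is the Claim_ definition above) =====
theorem generate_self_conjugate_partitions_spec :
    Claim_equal_generate_self_conjugate_partitions := by
  intro n _ hpre
  unfold Spec_generate_self_conjugate_partitions
  unfold generate_self_conjugate_partitions generate_self_conjugate_partitions_alt
  rw [pv_helperA_eq n.toNat n n [] [] (Or.inl rfl)]
  simp only [List.nil_append, List.map_id_fun', id]
  apply List.filter_congr
  intro s hs
  obtain ⟨sp, sb, sne⟩ := pv_partsB_mem n.toNat n n s hs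
  exact pv_check_eq s (sne hpre) sp (fun x hx => (sb x hx).1)
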